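-- pv_equiv track=rewrite | github.com/fnathas/Tucil1_13522145 | src/read.py | compare_paths
-- ===== SOURCE A (Python) =====
-- def compare_path_with_sequence(
--     path: list[tuple[str, tuple[int, int]]], sequence: list[str],
-- ) -> bool:
--     for i in range(0, len(path)-len(sequence)+1):
--         if all(path[i+j][0] == sequence[j] for j in range(len(sequence))):
--             return True
--     return False
--
-- def compare_paths(
--     all_paths: list[list[tuple[str, tuple[int, int]]]],
--     sequences: list[list[str]],
--     rewards: list[int],
-- ) -> tuple[list[list[tuple[str, tuple[int, int]]]], int]:
--     result = []
--     point = 0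
--     temp = 0
--     for path in all_paths:
--         for i in range(len(sequences)):
--             if compare_path_with_sequence(path, sequences[i]):
--                 point += rewards[i]
--         if (len(result) == 0):
--             result = path
--             temp = point
--         else:
--             if (point > temp):
--                 result = path
--                 temp = point
--         point = 0
--
--     return result, temp
-- ===== SOURCE B (Python) =====
-- # B reduces contiguous-subsequence-of-tokens matching to substring search:
-- # each token list is encoded as a \x00-delimited string and tested with
-- # Python's C-level substring operator, with all patterns built once up front.
-- SEP = "\x00"
--
-- def _enc(tokens):
--     return SEP + "".join(t + SEP for t in tokens)
--
-- def compare_paths(all_paths, sequences, rewards):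
--     pats = [_enc(seq) for seq in sequences]
--     best, best_score = [], 0
--     for path in all_paths:
--         text = _enc([cell[0] for cell in path])
--         score = sum(r for pat, r in zip(pats, rewards) if pat in text)
--         if not best or score > best_score:
--             best, best_score = path, score
--     return best, best_score
-- ===== Notes on version B (the rewrite author's own statement) =====
-- stated objective: faster
-- what changed: B replaces A's per-(path,sequence) nested index loops by a reduction of token-subsequence matching to plain substring search: every token list is encoded once as a NUL-delimited string (NUL cannot occur in the printable-ASCII domain) and each test is a single C-level 'pattern in text', with all sequence patterns precomputed outside the path loop and rewards combined via one zip-sum.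
import Mathlib
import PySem

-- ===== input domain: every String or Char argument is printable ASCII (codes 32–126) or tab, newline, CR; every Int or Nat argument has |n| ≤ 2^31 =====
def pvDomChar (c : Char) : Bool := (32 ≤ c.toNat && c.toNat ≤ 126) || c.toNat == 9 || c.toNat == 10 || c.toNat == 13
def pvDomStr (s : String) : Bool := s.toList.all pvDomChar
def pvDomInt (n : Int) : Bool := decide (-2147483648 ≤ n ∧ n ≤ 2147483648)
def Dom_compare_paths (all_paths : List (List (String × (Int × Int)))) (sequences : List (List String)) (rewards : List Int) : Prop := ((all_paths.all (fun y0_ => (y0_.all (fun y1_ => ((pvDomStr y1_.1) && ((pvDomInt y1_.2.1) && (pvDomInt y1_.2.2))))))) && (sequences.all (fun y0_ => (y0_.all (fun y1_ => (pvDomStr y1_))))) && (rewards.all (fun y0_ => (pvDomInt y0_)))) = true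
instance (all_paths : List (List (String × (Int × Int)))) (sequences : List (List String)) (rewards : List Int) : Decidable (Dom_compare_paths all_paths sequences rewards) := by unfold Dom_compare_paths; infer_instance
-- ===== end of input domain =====

-- B replaces token-by-token window scanning by substring search: every token list is
-- encoded once as a NUL-delimited character string (NUL cannot occur in Dom's strings)
-- and each sequence test becomes a single 'pattern in text'; same return value.

-- ===== PORT A =====
-- path[i+j][0] / sequence[j] / sequences[i] / rewards[i]: every index is in range whenever
-- it is evaluated (for rewards[i] this is guaranteed by Pre_, Python raises otherwise),
-- so pyGetD's default is never used.
def compare_path_with_sequence (path : List (String × (Int × Int))) (sequence : List String) : Bool :=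
  (PySem.List.pyRange 0 ((path.length : Int) - (sequence.length : Int) + 1) 1).any (fun i =>
    (PySem.List.pyRange 0 (sequence.length : Int) 1).all (fun j =>
      (PySem.List.pyGetD path (i + j) ("", (0, 0))).1 == PySem.List.pyGetD sequence j ""))

def compare_paths (all_paths : List (List (String × (Int × Int)))) (sequences : List (List String)) (rewards : List Int) : (List (String × (Int × Int))) × Int :=
  let st := all_paths.foldl (fun (st : (List (String × (Int × Int))) × Int) path =>
    let result := st.1
    let temp := st.2
    let point : Int := (PySem.List.pyRange 0 (sequences.length : Int) 1).foldl (fun point i =>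
      if compare_path_with_sequence path (PySem.List.pyGetD sequences i []) then
        point + PySem.List.pyGetD rewards i 0
      else point) 0
    if result.length == 0 then (path, point)
    else if point > temp then (path, point)
    else (result, temp)) ([], 0)
  (st.1, st.2)

-- ===== PORT B =====
-- SEP = "\x00"; _enc(tokens) = SEP + "".join(t + SEP for t in tokens), as a List Char.
def pvSep : Char := Char.ofNat 0

def pvEncBody (tokens : List String) : List Char :=
  tokens.flatMap (fun t => t.toList ++ [pvSep])

def pvEnc (tokens : List String) : List Char :=
  pvSep :: pvEncBody tokens

def compare_paths_alt (all_paths : List (List (String × (Int × Int)))) (sequences : List (List String)) (rewards : List Int) : (List (String × (Int × Int))) × Int :=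
  let pats := sequences.map pvEnc
  all_paths.foldl (fun (st : (List (String × (Int × Int))) × Int) path =>
    let text := pvEnc (path.map (fun cell => cell.1))
    let score : Int := (pats.zip rewards).foldl (fun a p =>
      if PySem.Chars.isIn p.1 text then a + p.2 else a) 0
    if st.1 == [] || score > st.2 then (path, score) else st) ([], 0)

-- ===== PRECONDITION & SPEC =====
-- Pre_ excludes exactly the inputs on which Python A raises IndexError (rewards[i] with
-- i ≥ len(rewards)): A raises iff some sequence beyond the rewards list occurs
-- contiguously in some path.
def Pre_compare_paths (all_paths : List (List (String × (Int × Int)))) (sequences : List (List String)) (rewards : List Int) : Prop :=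
  ∀ seq ∈ sequences.drop rewards.length, ∀ path ∈ all_paths, ¬ (seq <:+: path.map Prod.fst)
instance (all_paths : List (List (String × (Int × Int)))) (sequences : List (List String)) (rewards : List Int) : Decidable (Pre_compare_paths all_paths sequences rewards) := by unfold Pre_compare_paths; infer_instance

def pvWitness_compare_paths : (List (List (String × (Int × Int)))) × List (List String) × List Int :=
  ([[("A", (0, 0))]], [["A"]], [1])

def Spec_compare_paths (all_paths : List (List (String × (Int × Int)))) (sequences : List (List String)) (rewards : List Int) (out : (List (String × (Int × Int))) × Int) : Prop := out = compare_paths_alt all_paths sequences rewards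
instance (all_paths : List (List (String × (Int × Int)))) (sequences : List (List String)) (rewards : List Int) (out : (List (String × (Int × Int))) × Int) : Decidable (Spec_compare_paths all_paths sequences rewards out) := by unfold Spec_compare_paths; infer_instance

-- ===== CLAIM (what is proved, stated in full; the proofs are below) =====
def Claim_equal_compare_paths : Prop := ∀ (all_paths : List (List (String × (Int × Int)))) (sequences : List (List String)) (rewards : List Int), Dom_compare_paths all_paths sequences rewards → Pre_compare_paths all_paths sequences rewards → Spec_compare_paths all_paths sequences rewards (compare_paths all_paths sequences rewards)

-- ===== LEMMAS AND PROOFS =====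

-- a Dom string never contains the separator character
theorem pvSep_not_mem_of_dom (s : String) (h : pvDomStr s = true) : pvSep ∉ s.toList := by
  intro hmem
  have := (List.all_eq_true.mp h) pvSep hmem
  simp [pvDomChar, pvSep] at this

-- splitting on the first separator: if sep ∉ a then an equation a ++ sep::u = b ++ sep::v
-- forces b to stop at a's separator or to extend past it
theorem pvSepSplit (a : List Char) (u b v : List Char) (ha : pvSep ∉ a)
    (h : a ++ pvSep :: u = b ++ pvSep :: v) :
    (b = a ∧ v = u) ∨ ∃ b', b = a ++ pvSep :: b' ∧ u = b' ++ pvSep :: v := by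
  induction a generalizing b with
  | nil =>
    cases b with
    | nil =>
      simp only [List.nil_append, List.cons.injEq, true_and] at h
      exact Or.inl ⟨rfl, h.symm⟩
    | cons d b' =>
      simp only [List.nil_append, List.cons_append, List.cons.injEq] at h
      right; exact ⟨b', by simp [← h.1], h.2⟩
  | cons x a' ih =>
    have hx : x ≠ pvSep := fun hxe => ha (by simp [hxe])
    cases b with
    | nil =>
      simp only [List.cons_append, List.nil_append, List.cons.injEq] at h
      exact absurd h.1 hx
    | cons d b' =>
      simp only [List.cons_append, List.cons.injEq] at h
      rcases ih b' (fun hm => ha (List.mem_cons_of_mem _ hm)) h.2 with ⟨rfl, rfl⟩ | ⟨c, rfl, rfl⟩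
      · left; exact ⟨by simp [h.1], rfl⟩
      · right; exact ⟨c, by simp [h.1], rfl⟩

theorem pvEncBody_append (a b : List String) :
    pvEncBody (a ++ b) = pvEncBody a ++ pvEncBody b := by
  simp [pvEncBody]

-- prefix direction: a body-prefix forces a token-prefix when tokens are separator-free
theorem pvBody_prefix (seq : List String) (ys : List String)
    (hs : ∀ t ∈ seq, pvSep ∉ t.toList) (hy : ∀ t ∈ ys, pvSep ∉ t.toList)
    (h : pvEncBody seq <+: pvEncBody ys) : seq <+: ys := by
  induction seq generalizing ys with
  | nil => exact List.nil_prefix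
  | cons q seq' ih =>
    cases ys with
    | nil =>
      exfalso
      have := h.length_le
      simp [pvEncBody] at this
    | cons y ys' =>
      obtain ⟨t, ht⟩ := h
      simp only [pvEncBody, List.flatMap_cons, List.append_assoc, List.singleton_append] at ht
      rcases pvSepSplit y.toList (ys'.flatMap (fun t => t.toList ++ [pvSep])) q.toList
          ((seq'.flatMap (fun t => t.toList ++ [pvSep])) ++ t)
          (hy y (by simp)) (by simpa [List.append_assoc] using ht.symm) with
        ⟨hb, hv⟩ | ⟨b', hb, _⟩
      · have hqy : q = y := String.ext hb
        have hrec : seq' <+: ys' := by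
          apply ih ys' (fun x hx => hs x (by simp [hx])) (fun x hx => hy x (by simp [hx]))
          exact ⟨t, by simpa [pvEncBody] using hv⟩
        exact List.cons_prefix_cons.mpr ⟨hqy, hrec⟩
      · exfalso
        exact hs q (by simp) (by rw [hb]; simp)

-- locating a separator-anchored infix: it must start at a token boundary
theorem pvSep_infix (syms : List String) (X : List Char)
    (h : ∀ t ∈ syms, pvSep ∉ t.toList)
    (hin : (pvSep :: X) <:+: (pvSep :: pvEncBody syms)) :
    ∃ ys, ys <:+ syms ∧ X <+: pvEncBody ys := by
  induction syms generalizing X with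
  | nil =>
    obtain ⟨s, t, hst⟩ := hin
    have hX : X = [] := by
      have hl := congrArg List.length hst
      simp [pvEncBody] at hl
      exact List.eq_nil_of_length_eq_zero (by omega)
    exact ⟨[], List.suffix_rfl, by simp [hX]⟩
  | cons y ys' ih =>
    obtain ⟨s, t, hst⟩ := hin
    cases s with
    | nil =>
      refine ⟨y :: ys', List.suffix_rfl, ⟨t, ?_⟩⟩
      simpa using hst
    | cons c s' =>
      simp only [List.cons_append, List.cons.injEq] at hst
      have hbody : pvEncBody (y :: ys') = y.toList ++ pvSep :: pvEncBody ys' := by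
        simp [pvEncBody]
      rw [hbody] at hst
      have heq : y.toList ++ pvSep :: pvEncBody ys' = s' ++ pvSep :: (X ++ t) := by
        simpa [List.append_assoc] using hst.2.symm
      rcases pvSepSplit y.toList (pvEncBody ys') s' (X ++ t) (h y (by simp)) heq with
        ⟨_, hv⟩ | ⟨b', _, hu⟩
      · exact ⟨ys', List.suffix_cons _ _, ⟨t, hv⟩⟩
      · obtain ⟨ys, hsuf, hpre⟩ := ih X (fun t ht => h t (by simp [ht]))
          ⟨pvSep :: b', t, by simp [hu]⟩
        exact ⟨ys, hsuf.trans (List.suffix_cons _ _), hpre⟩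

-- the encoding is monotone: an embedded token list stays embedded after encoding
theorem pvEnc_infix_of (seq b : List String) (a : List String) :
    pvEnc seq <:+: pvEnc (a ++ seq ++ b) := by
  induction a with
  | nil =>
    exact (show pvEnc seq <+: pvEnc ([] ++ seq ++ b) from
      ⟨pvEncBody b, by simp [pvEnc, pvEncBody_append]⟩).isInfix
  | cons y a' ih =>
    refine ih.trans ?_
    have h1 : pvEnc ((y :: a') ++ seq ++ b) = (pvSep :: y.toList) ++ pvEnc (a' ++ seq ++ b) := by
      simp [pvEnc, pvEncBody]
    rw [h1]
    exact (List.suffix_append _ _).isInfix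

-- the encoding preserves and reflects contiguous-subsequence containment
theorem pvEnc_infix (seq syms : List String)
    (hs : ∀ t ∈ seq, pvSep ∉ t.toList) (hy : ∀ t ∈ syms, pvSep ∉ t.toList) :
    pvEnc seq <:+: pvEnc syms ↔ seq <:+: syms := by
  constructor
  · intro h
    obtain ⟨ys, hsuf, hpre⟩ := pvSep_infix syms (pvEncBody seq) hy h
    have : seq <+: ys :=
      pvBody_prefix seq ys hs (fun t ht => hy t (hsuf.subset ht)) hpre
    exact this.isInfix.trans hsuf.isInfix
  · rintro ⟨a, b, rfl⟩
    exact pvEnc_infix_of seq b a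

-- window form of contiguous containment
theorem window_iff_infix (seq syms : List String) :
    (∃ k, k + seq.length ≤ syms.length ∧ (syms.drop k).take seq.length = seq)
      ↔ seq <:+: syms := by
  constructor
  · rintro ⟨k, _, hw⟩
    exact (hw ▸ (syms.drop k).take_prefix seq.length).isInfix.trans
      (syms.drop_suffix k).isInfix
  · rintro ⟨a, b, rfl⟩
    refine ⟨a.length, by simp only [List.length_append]; omega, ?_⟩
    rw [List.append_assoc, List.drop_left, List.take_left]

-- A's pointwise window test decides token-level contiguous containment
theorem matchA_iff (path : List (String × (Int × Int))) (seq : List String) :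
    compare_path_with_sequence path seq = true ↔ seq <:+: path.map Prod.fst := by
  rw [← window_iff_infix]
  unfold compare_path_with_sequence
  simp only [List.any_eq_true, PySem.List.mem_pyRange_one, List.all_eq_true]
  have hmap : (List.map Prod.fst path).length = path.length := List.length_map ..
  constructor
  · rintro ⟨i, ⟨hi0, hiu⟩, hall⟩
    refine ⟨i.toNat, by omega, ?_⟩
    apply List.ext_getElem
    · simp; omega
    · intro l h1 h2
      have hlm : l < seq.length := by simpa using h2
      have := hall (l : Int) ⟨by positivity, by omega⟩
      rw [show i + (l : Int) = ((i.toNat + l : Nat) : Int) by omega] at this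
      simp only [PySem.List.pyGetD_natCast] at this
      rw [List.getD_eq_getElem _ _ (by omega), List.getD_eq_getElem _ _ hlm] at this
      simp only [beq_iff_eq] at this
      simpa [List.getElem_take, List.getElem_drop] using this
  · rintro ⟨k, hkm, heq⟩
    refine ⟨(k : Int), ⟨by positivity, by omega⟩, ?_⟩
    intro j hj
    obtain ⟨hj0, hjm⟩ := hj
    rw [show j = ((j.toNat : Nat) : Int) by omega,
        show (k : Int) + ((j.toNat : Nat) : Int) = ((k + j.toNat : Nat) : Int) by omega]
    simp only [PySem.List.pyGetD_natCast]
    rw [List.getD_eq_getElem _ _ (show k + j.toNat < path.length by omega),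
        List.getD_eq_getElem _ _ (show j.toNat < seq.length by omega)]
    simp only [beq_iff_eq]
    have := congrArg (fun l => l[j.toNat]?) heq
    simp [List.getElem?_take, List.getElem?_drop,
      List.getElem?_eq_getElem (show k + j.toNat < (path.map Prod.fst).length by simpa using by omega),
      List.getElem?_eq_getElem (show j.toNat < seq.length by omega)] at this
    exact this.2

-- A's window test equals B's encoded substring test (on separator-free tokens)
theorem guard_eq (path : List (String × (Int × Int))) (seq : List String)
    (hs : ∀ t ∈ seq, pvSep ∉ t.toList)
    (hp : ∀ t ∈ path.map Prod.fst, pvSep ∉ t.toList) :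
    compare_path_with_sequence path seq
      = PySem.Chars.isIn (pvEnc seq) (pvEnc (path.map Prod.fst)) := by
  rw [Bool.eq_iff_iff, matchA_iff, PySem.Chars.isIn_iff_infix]
  exact (pvEnc_infix seq (path.map Prod.fst) hs hp).symm

theorem foldl_ite_add {α : Type} (P : α → Bool) (g : α → Int) (l : List α) (init : Int) :
    l.foldl (fun p x => if P x then p + g x else p) init
      = init + (l.map (fun x => if P x then g x else 0)).sum := by
  induction l generalizing init with
  | nil => simp
  | cons a l ih =>
    simp only [List.foldl_cons, List.map_cons, List.sum_cons, ih]
    split_ifs <;> ring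

-- index-based guarded sum over range(len s) = guarded sum over zip s r
-- (for k ≥ len r the index-based term is a guarded getD default 0, matching zip truncation)
theorem sum_zip_eq (occ : List String → Bool) (s : List (List String)) (r : List Int) :
    ((List.range s.length).map (fun k => if occ (s.getD k []) then r.getD k 0 else 0)).sum
      = ((s.zip r).map (fun p => if occ p.1 then p.2 else 0)).sum := by
  induction s generalizing r with
  | nil => simp
  | cons a s ih =>
    rw [List.length_cons, List.range_succ_eq_map]
    cases r with
    | nil =>
      simp only [List.zip_nil_right, List.map_nil, List.sum_nil]
      refine List.sum_eq_zero ?_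
      intro x hx
      simp only [List.mem_map] at hx
      obtain ⟨k, -, rfl⟩ := hx
      simp
    | cons y r =>
      simp only [List.map_cons, List.sum_cons, List.zip_cons_cons, List.map_map,
        List.getD_cons_zero]
      rw [← ih r]
      congr 1

-- per-path: A's reward loop computes B's zip score
theorem score_eq (sequences : List (List String)) (rewards : List Int)
    (path : List (String × (Int × Int)))
    (hs : ∀ seq ∈ sequences, ∀ t ∈ seq, pvSep ∉ t.toList)
    (hp : ∀ t ∈ path.map Prod.fst, pvSep ∉ t.toList) :
    (PySem.List.pyRange 0 (sequences.length : Int) 1).foldl (fun point i =>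
      if compare_path_with_sequence path (PySem.List.pyGetD sequences i []) then
        point + PySem.List.pyGetD rewards i 0
      else point) 0 =
    ((sequences.map pvEnc).zip rewards).foldl (fun a p =>
      if PySem.Chars.isIn p.1 (pvEnc (path.map (fun cell => cell.1))) then a + p.2 else a) 0 := by
  rw [PySem.List.pyRange_one, List.foldl_map]
  simp only [zero_add, sub_zero, Int.toNat_natCast, PySem.List.pyGetD_natCast]
  rw [foldl_ite_add (fun k => compare_path_with_sequence path (sequences.getD k []))
        (fun k => rewards.getD k 0),
      List.zip_map_left, List.foldl_map]
  simp only [Prod.map_fst, Prod.map_snd, id_eq]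
  rw [foldl_ite_add (fun p : List String × Int =>
          PySem.Chars.isIn (pvEnc p.1) (pvEnc (path.map (fun cell => cell.1))))
        (fun p : List String × Int => p.2)]
  congr 1
  rw [← sum_zip_eq (fun q => PySem.Chars.isIn (pvEnc q) (pvEnc (path.map (fun cell => cell.1))))
        sequences rewards]
  apply congrArg
  apply List.map_congr_left
  intro k hk
  have hklt : k < sequences.length := List.mem_range.mp hk
  have hmem : sequences.getD k [] ∈ sequences := by
    rw [List.getD_eq_getElem _ _ hklt]; exact List.getElem_mem _
  rw [guard_eq path (sequences.getD k []) (hs _ hmem) hp]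

-- extract separator-freshness from Dom
theorem dom_fresh (all_paths : List (List (String × (Int × Int)))) (sequences : List (List String)) (rewards : List Int)
    (hd : Dom_compare_paths all_paths sequences rewards) :
    (∀ seq ∈ sequences, ∀ t ∈ seq, pvSep ∉ t.toList) ∧
    (∀ path ∈ all_paths, ∀ t ∈ path.map Prod.fst, pvSep ∉ t.toList) := by
  unfold Dom_compare_paths at hd
  simp only [Bool.and_eq_true, List.all_eq_true] at hd
  refine ⟨fun seq hseq t ht => pvSep_not_mem_of_dom t (hd.1.2 seq hseq t ht), ?_⟩
  intro path hpath t ht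
  obtain ⟨cell, hcell, rfl⟩ := List.mem_map.mp ht
  exact pvSep_not_mem_of_dom _ (hd.1.1 path hpath cell hcell).1

-- ===== VERDICT (by name: the statement is the Claim_ definition above) =====
theorem compare_paths_spec : Claim_equal_compare_paths := by
  intro all_paths sequences rewards hdom _
  obtain ⟨hs, hp⟩ := dom_fresh all_paths sequences rewards hdom
  unfold Spec_compare_paths compare_paths compare_paths_alt
  rw [Prod.mk.eta]
  apply PySem.List.foldl_congr_mem'
  intro path hpath st
  rw [score_eq sequences rewards path hs (hp path hpath)]
  by_cases h : st.1 = []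
  · simp [h]
  · have hlen : (st.1.length == 0) = false := by
      simp [List.length_eq_zero_iff, h]
    simp [h, hlen]
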